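-- pv_equiv track=rewrite | github.com/CSULA-EE-5450/module-1-summative-ahuynh30 | slapjack.py | only1
-- ===== SOURCE A (Python) =====
-- from typing import List
--
-- def only1(done: List[bool]):
--     true_found = False
--     for v in done:
--         if v:
--             # a True was found!
--             if true_found:
--                 # found too many True's
--                 return False
--             else:
--                 # found the first True
--                 true_found = True
--     # found zero or one True value
--     return true_found
-- ===== SOURCE B (Python) =====
-- def only1(done):
--     return sum(1 for v in done if v) == 1
-- ===== Notes on version B (the rewrite author's own statement) =====
-- stated objective: simpler
-- what changed: Replaces the flag-tracking early-exit loop with a single count-then-compare: sum the truthy elements and test the count equals one.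
import Mathlib
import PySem

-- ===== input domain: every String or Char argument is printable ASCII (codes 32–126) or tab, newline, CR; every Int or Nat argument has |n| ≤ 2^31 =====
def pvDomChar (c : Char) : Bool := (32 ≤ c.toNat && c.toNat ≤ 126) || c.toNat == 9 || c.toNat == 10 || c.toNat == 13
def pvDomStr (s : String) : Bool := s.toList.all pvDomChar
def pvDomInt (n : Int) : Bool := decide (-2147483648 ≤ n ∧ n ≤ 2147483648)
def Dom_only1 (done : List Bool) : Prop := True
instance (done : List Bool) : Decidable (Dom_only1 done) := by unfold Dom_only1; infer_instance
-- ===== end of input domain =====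

-- ===== PORT A =====
-- loop with running flag and early return on a second True
def only1Loop (done : List Bool) (trueFound : Bool) : Bool :=
  match done with
  | [] => trueFound
  | v :: rest =>
    if v then
      if trueFound then false else only1Loop rest true
    else only1Loop rest trueFound

def only1 (done : List Bool) : Bool := only1Loop done false

-- ===== PORT B =====
-- B: count-then-compare; one honest line: full pass producing a count, then test == 1
def only1_alt (done : List Bool) : Bool :=
  (done.foldl (fun acc v => if v then acc + 1 else acc) (0 : Int)) == 1

-- ===== PRECONDITION & SPEC =====
def Spec_only1 (done : List Bool) (out : Bool) : Prop := out = only1_alt done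
instance (done : List Bool) (out : Bool) : Decidable (Spec_only1 done out) := by unfold Spec_only1; infer_instance

-- ===== CLAIM (what is proved, stated in full; the proofs are below) =====
def Claim_equal_only1 : Prop := ∀ (done : List Bool), Dom_only1 done → Spec_only1 done (only1 done)

-- ===== LEMMAS AND PROOFS =====

lemma foldl_count_shift (done : List Bool) (k : Int) :
    done.foldl (fun acc v => if v then acc + 1 else acc) k
      = k + done.foldl (fun acc v => if v then acc + 1 else acc) 0 := by
  induction done generalizing k with
  | nil => simp
  | cons v rest ih =>
    rcases v with _ | _
    · simpa using ih k
    · simp only [List.foldl, if_true]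
      norm_num
      rw [ih (k+1), ih 1]; ring

lemma foldl_count_nonneg (done : List Bool) :
    0 ≤ done.foldl (fun acc v => if v then acc + 1 else acc) (0 : Int) := by
  induction done with
  | nil => simp
  | cons v rest ih =>
    rcases v with _ | _
    · simpa using ih
    · simp only [List.foldl, if_true]
      norm_num
      rw [foldl_count_shift]
      have := ih
      omega

lemma only1Loop_eq (done : List Bool) (flag : Bool) :
    only1Loop done flag
      = (((if flag then (1:Int) else 0)
          + done.foldl (fun acc v => if v then acc + 1 else acc) 0) == 1) := by
  induction done generalizing flag with
  | nil => rcases flag with _ | _ <;> simp [only1Loop]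
  | cons v rest ih =>
    rcases v with _ | _
    · simpa [only1Loop] using ih flag
    · rcases flag with _ | _
      · rw [only1Loop, if_pos rfl, if_neg (by simp), ih true]
        simp only [List.foldl, if_true]
        norm_num
        rw [foldl_count_shift rest 1]
        simp
      · rw [only1Loop, if_pos rfl, if_pos rfl]
        simp only [List.foldl, if_true]
        norm_num
        rw [foldl_count_shift rest 1]
        have h := foldl_count_nonneg rest
        have h2 : ¬ ((1:Int) + rest.foldl (fun acc v => if v then acc + 1 else acc) 0 = 0) := by omega
        simp [h2]

-- ===== VERDICT (by name: the statement is the Claim_ definition above) =====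
theorem only1_spec : Claim_equal_only1 := by
  intro done _
  unfold Spec_only1 only1 only1_alt
  rw [only1Loop_eq]
  simp
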